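-- pv_equiv track=rewrite | github.com/bitsofbits/advent_of_code | 2020/day_06/pythonimp/implementation.py | part_1
-- ===== SOURCE A (Python) =====
-- def parse(text):
--     for group in text.strip().split("\n\n"):
--         g = []
--         for person in group.split("\n"):
--             g.append(set(person))
--         yield g
--
-- def part_1(text):
--     """
--     >>> part_1(EXAMPLE_TEXT)
--     11
--     """
--     total = 0
--     for group in parse(text):
--         yes_answers = group[0]
--         for person in group[1:]:
--             yes_answers |= person
--         total += len(yes_answers)
--     return total
-- ===== SOURCE B (Python) =====
-- def part_1(text):
--     # Single streaming pass over the stripped text: no splitting, no per-group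
--     # containers built up front.  A run of two newlines ends a group (resetting
--     # the 'seen' state, mirroring how "\n\n" separators are consumed greedily);
--     # every non-newline character not yet seen in the current group is counted
--     # immediately.
--     total = 0
--     seen = set()
--     run = 0
--     for c in text.strip():
--         if c == "\n":
--             run += 1
--             if run == 2:
--                 seen = set()
--                 run = 0
--         else:
--             run = 0
--             if c not in seen:
--                 seen.add(c)
--                 total += 1
--     return total
-- ===== Notes on version B (the rewrite author's own statement) =====
-- stated objective: alternative
-- what changed: Replaces A's staged pipeline (split the text on double newlines, split each group into persons, build one set per person and fold them with |=) by a single streaming pass over the stripped characters that keeps a newline-run counter and one incrementally-updated seen-set, counting each new non-newline character of a group the moment it appears; no splitting and no per-person sets.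
import Mathlib
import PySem

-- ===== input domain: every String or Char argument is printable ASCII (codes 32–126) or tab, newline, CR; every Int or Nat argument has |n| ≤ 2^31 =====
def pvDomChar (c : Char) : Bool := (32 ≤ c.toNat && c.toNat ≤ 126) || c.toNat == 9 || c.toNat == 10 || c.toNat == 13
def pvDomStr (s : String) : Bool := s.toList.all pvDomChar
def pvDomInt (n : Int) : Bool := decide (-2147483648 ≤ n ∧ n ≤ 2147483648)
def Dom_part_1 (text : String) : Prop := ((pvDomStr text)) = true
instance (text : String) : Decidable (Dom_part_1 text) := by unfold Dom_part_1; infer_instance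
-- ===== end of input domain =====

-- B replaces A's parse-into-groups-of-person-sets and union-fold by a single streaming
-- character scan with a newline-run counter and an incremental seen-set (objective: alternative).

-- ===== PORT A =====
-- parse: per group, list of per-person character sets; part_1: union-fold each group, sum lengths.
def part_1 (text : String) : Int :=
  (PySem.Chars.splitOn (PySem.Chars.strip text.toList) "\n\n".toList).foldl
    (fun total group =>
      let g := (PySem.Chars.splitOn group "\n".toList).foldl
        (fun acc person => acc ++ [PySem.Set.ofList person]) []
      let yes_answers := (PySem.List.slice g (some 1) none).foldl PySem.Set.union
        (PySem.List.pyGetD g 0 PySem.Set.empty)   -- group[0]: split never returns []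
      total + PySem.Set.len yes_answers) 0

-- ===== PORT B =====
-- single streaming pass over the stripped characters: state (total, seen, run)
def part_1_alt (text : String) : Int :=
  ((PySem.Chars.strip text.toList).foldl
    (fun (s : Int × PySem.Set Char × Int) c =>
      let (total, seen, run) := s
      if c = '\n' then
        if run + 1 == 2 then (total, PySem.Set.empty, 0)
        else (total, seen, run + 1)
      else
        if PySem.Set.contains seen c then (total, seen, 0)
        else (total + 1, PySem.Set.add seen c, 0))
    (0, PySem.Set.empty, 0)).1

-- ===== PRECONDITION & SPEC =====
def Spec_part_1 (text : String) (out : Int) : Prop := out = part_1_alt text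
instance (text : String) (out : Int) : Decidable (Spec_part_1 text out) := by unfold Spec_part_1; infer_instance

-- ===== CLAIM (what is proved, stated in full; the proofs are below) =====
def Claim_equal_part_1 : Prop := ∀ (text : String), Dom_part_1 text → Spec_part_1 text (part_1 text)

-- ===== LEMMAS AND PROOFS =====

-- Structural characterisation of splitting on a single newline.
def splitNL : List Char → List (List Char)
  | [] => [[]]
  | c :: xs =>
    if c = '\n' then [] :: splitNL xs
    else match splitNL xs with
      | [] => [[c]]
      | p :: ps => (c :: p) :: ps

theorem splitNL_ne_nil (l : List Char) : splitNL l ≠ [] := by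
  cases l with
  | nil => simp [splitNL]
  | cons c xs =>
    simp only [splitNL]
    split_ifs
    · simp
    · cases splitNL xs <;> simp

theorem go_eq_splitNL (fuel : Nat) : ∀ (l cur : List Char) (accs : List (List Char)),
    l.length < fuel →
    PySem.Chars.splitOn.go ['\n'] fuel l cur accs =
      accs.reverse ++ (match splitNL l with
        | [] => []
        | p :: ps => (cur.reverse ++ p) :: ps) := by
  induction fuel with
  | zero => intro l cur accs h; omega
  | succ f ih =>
    intro l cur accs h
    cases l with
    | nil => simp [PySem.Chars.splitOn.go, splitNL]
    | cons c rest =>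
      by_cases hc : c = '\n'
      · subst hc
        have hpref : List.isPrefixOf ['\n'] ('\n' :: rest) = true := by
          simp [List.isPrefixOf]
        rw [PySem.Chars.splitOn.go]
        simp only [hpref, if_pos]
        rw [show List.drop (List.length ['\n']) ('\n' :: rest) = rest by simp]
        rw [ih rest [] (List.reverse cur :: accs) (by simp at h ⊢; omega)]
        simp only [splitNL, if_true]
        cases hs : splitNL rest with
        | nil => exact absurd hs (splitNL_ne_nil rest)
        | cons p ps => simp
      · have hpref : List.isPrefixOf ['\n'] (c :: rest) = false := by
          simp [List.isPrefixOf]; intro h'; exact absurd h'.symm hc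
        rw [PySem.Chars.splitOn.go]
        simp only [hpref]
        rw [if_neg (by simp)]
        rw [ih rest (c :: cur) accs (by simp at h ⊢; omega)]
        simp only [splitNL, if_neg hc]
        cases hs : splitNL rest with
        | nil => exact absurd hs (splitNL_ne_nil rest)
        | cons p ps => simp

theorem splitOn_newline (g : List Char) :
    PySem.Chars.splitOn g ['\n'] = splitNL g := by
  unfold PySem.Chars.splitOn
  rw [go_eq_splitNL (g.length + 1) g [] [] (by omega)]
  cases hs : splitNL g with
  | nil => exact absurd hs (splitNL_ne_nil g)
  | cons p ps => simp

theorem flatten_splitNL (l : List Char) :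
    (splitNL l).flatten = l.filter (fun c => !(c == '\n')) := by
  induction l with
  | nil => simp [splitNL]
  | cons c xs ih =>
    simp only [splitNL]
    by_cases hc : c = '\n'
    · subst hc; simp [List.filter, ih]
    · rw [if_neg hc]
      cases hs : splitNL xs with
      | nil => exact absurd hs (splitNL_ne_nil xs)
      | cons p ps =>
        rw [hs] at ih
        simp only [List.flatten_cons] at ih ⊢
        have hb : (c == '\n') = false := beq_eq_false_iff_ne.mpr hc
        simp [List.filter, hb, ← ih]

theorem union_ofList {α : Type} [BEq α] [LawfulBEq α] (s : PySem.Set α) (p : List α) :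
    PySem.Set.union s (PySem.Set.ofList p) = PySem.Set.update s p := by
  show PySem.Set.update s (PySem.Set.ofList p) = PySem.Set.update s p
  rw [PySem.Set.update_eq_append_filter, PySem.Set.update_eq_append_filter,
    PySem.Set.ofList_ofList]

theorem foldl_union_eq_update_flatten {α : Type} [BEq α] [LawfulBEq α]
    (ps : List (List α)) : ∀ (s : PySem.Set α),
    ps.foldl (fun s p => PySem.Set.union s (PySem.Set.ofList p)) s =
      PySem.Set.update s ps.flatten := by
  induction ps with
  | nil => intro s; simp [PySem.Set.update_nil]
  | cons p rest ih =>
    intro s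
    simp only [List.foldl_cons, List.flatten_cons]
    rw [ih, union_ofList, ← PySem.Set.update_append]

-- per-group value of A equals the count of distinct non-newline characters of the group
theorem group_eq (g : List Char) :
    PySem.Set.len ((PySem.List.slice
        ((PySem.Chars.splitOn g "\n".toList).foldl
          (fun acc person => acc ++ [PySem.Set.ofList person]) []) (some 1) none).foldl
      PySem.Set.union
      (PySem.List.pyGetD
        ((PySem.Chars.splitOn g "\n".toList).foldl
          (fun acc person => acc ++ [PySem.Set.ofList person]) []) 0 PySem.Set.empty)) =
    PySem.Set.len (PySem.Set.ofList (g.filter (fun c => !(c == '\n')))) := by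
  rw [PySem.List.foldl_append_singleton_eq_map, List.nil_append]
  rw [show ("\n".toList) = ['\n'] from rfl, splitOn_newline]
  cases hs : splitNL g with
  | nil => exact absurd hs (splitNL_ne_nil g)
  | cons p ps =>
    simp only [List.map_cons, PySem.List.slice_from_one, List.tail_cons,
      PySem.List.pyGetD_zero_cons, List.foldl_map]
    rw [foldl_union_eq_update_flatten]
    have h1 : PySem.Set.ofList p = PySem.Set.update [] p := (PySem.Set.update_nil_left p).symm
    rw [h1, ← PySem.Set.update_append, PySem.Set.update_nil_left]
    have h2 : p ++ ps.flatten = (splitNL g).flatten := by rw [hs]; rfl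
    rw [h2, flatten_splitNL]

-- Structural characterisation of splitting on "\n\n" (greedy, left to right).
def splitNN : List Char → List (List Char)
  | [] => [[]]
  | '\n' :: '\n' :: xs => [] :: splitNN xs
  | c :: xs => match splitNN xs with
      | [] => [[c]]
      | p :: ps => (c :: p) :: ps

theorem splitNN_nn (xs : List Char) : splitNN ('\n' :: '\n' :: xs) = [] :: splitNN xs := rfl

theorem splitNN_cons (c : Char) (xs : List Char)
    (h : ∀ ys, c = '\n' → xs = '\n' :: ys → False) :
    splitNN (c :: xs) = match splitNN xs with
      | [] => [[c]]
      | p :: ps => (c :: p) :: ps := by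
  rw [splitNN.eq_def]
  split
  · rename_i heq; cases heq
  · rename_i ys heq
    injection heq with e1 e2
    exact (h ys e1 e2).elim
  · rename_i c2 xs2 hno heq
    injection heq with e1 e2
    subst e1; subst e2
    rfl

theorem splitNN_ne_nil (l : List Char) : splitNN l ≠ [] := by
  induction l using splitNN.induct with
  | case1 => simp [splitNN]
  | case2 xs ih => rw [splitNN_nn]; simp
  | case3 c xs h hnil ih =>
    rw [splitNN_cons c xs (fun ys hc hr => h ys hc hr), hnil]; simp
  | case4 c xs h p ps hps ih =>
    rw [splitNN_cons c xs (fun ys hc hr => h ys hc hr), hps]; simp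

theorem go_eq_splitNN (fuel : Nat) : ∀ (l cur : List Char) (accs : List (List Char)),
    l.length < fuel →
    PySem.Chars.splitOn.go ['\n', '\n'] fuel l cur accs =
      accs.reverse ++ (match splitNN l with
        | [] => []
        | p :: ps => (cur.reverse ++ p) :: ps) := by
  induction fuel with
  | zero => intro l cur accs h; omega
  | succ f ih =>
    intro l cur accs h
    cases l with
    | nil => simp [PySem.Chars.splitOn.go, splitNN]
    | cons c rest =>
      by_cases hall : c = '\n' ∧ ∃ ys, rest = '\n' :: ys
      · obtain ⟨hc, ys, hr⟩ := hall
        subst hc; subst hr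
        have hpref : List.isPrefixOf ['\n', '\n'] ('\n' :: '\n' :: ys) = true := by
          simp [List.isPrefixOf]
        rw [PySem.Chars.splitOn.go]
        simp only [hpref, if_pos]
        rw [show List.drop (List.length ['\n', '\n']) ('\n' :: '\n' :: ys) = ys by simp]
        rw [ih ys [] (List.reverse cur :: accs) (by simp at h ⊢; omega)]
        rw [splitNN_nn]
        cases hs : splitNN ys with
        | nil => exact absurd hs (splitNN_ne_nil ys)
        | cons p ps => simp
      · have h' : ∀ ys, c = '\n' → rest = '\n' :: ys → False :=
          fun ys hc hr => hall ⟨hc, ys, hr⟩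
        have hpref : List.isPrefixOf ['\n', '\n'] (c :: rest) = false := by
          cases rest with
          | nil =>
            by_cases hc : c = '\n' <;> simp [List.isPrefixOf, hc]
          | cons d ys =>
            by_cases hc : c = '\n'
            · have hd : d ≠ '\n' := fun hd => h' ys hc (by rw [hd])
              simp only [List.isPrefixOf, hc]
              simp
              exact fun hdd => hd hdd.symm
            · simp [List.isPrefixOf]
              exact fun hcc => (hc hcc.symm).elim
        rw [PySem.Chars.splitOn.go]
        simp only [hpref]
        rw [if_neg (by simp)]
        rw [ih rest (c :: cur) accs (by simp at h ⊢; omega)]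
        rw [splitNN_cons c rest h']
        cases hs : splitNN rest with
        | nil => exact absurd hs (splitNN_ne_nil rest)
        | cons p ps => simp

theorem splitOn_nn (l : List Char) :
    PySem.Chars.splitOn l ['\n', '\n'] = splitNN l := by
  unfold PySem.Chars.splitOn
  rw [go_eq_splitNN (l.length + 1) l [] [] (by omega)]
  cases hs : splitNN l with
  | nil => exact absurd hs (splitNN_ne_nil l)
  | cons p ps => simp

-- count of distinct non-newline characters of a group; sums over group lists
def groupCnt (g : List Char) : Int :=
  PySem.Set.len (PySem.Set.ofList (g.filter (fun c => !(c == '\n'))))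

def tailSum (gs : List (List Char)) : Int := (gs.map groupCnt).sum

-- value the scan adds while finishing the current group (initial seen-set `seen`)
-- and then processing the remaining groups from scratch
def S (seen : PySem.Set Char) : List (List Char) → Int
  | [] => 0
  | g :: rest =>
    (PySem.Set.len (PySem.Set.update seen (g.filter (fun c => !(c == '\n')))) -
      PySem.Set.len seen) + tailSum rest

theorem len_append_singleton (s : PySem.Set Char) (c : Char) :
    PySem.Set.len (s ++ [c]) = PySem.Set.len s + 1 := by
  simp [PySem.Set.len]

theorem S_empty (gs : List (List Char)) (h : gs ≠ []) :
    S PySem.Set.empty gs = tailSum gs := by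
  cases gs with
  | nil => exact absurd rfl h
  | cons g rest =>
    simp only [S]
    rw [PySem.Set.update_empty]
    simp [tailSum, groupCnt, PySem.Set.len, PySem.Set.empty]

def stepB (s : Int × PySem.Set Char × Int) (c : Char) : Int × PySem.Set Char × Int :=
  let (total, seen, run) := s
  if c = '\n' then
    if run + 1 == 2 then (total, PySem.Set.empty, 0)
    else (total, seen, run + 1)
  else
    if PySem.Set.contains seen c then (total, seen, 0)
    else (total + 1, PySem.Set.add seen c, 0)

theorem scan_eq (l : List Char) : ∀ (t : Int) (seen : PySem.Set Char),
    (l.foldl stepB (t, seen, 0)).1 = t + S seen (splitNN l) := by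
  induction l using splitNN.induct with
  | case1 =>
    intro t seen
    show t = t + S seen [[]]
    simp only [S]
    rw [show List.filter (fun c => !(c == '\n')) [] = [] from rfl, PySem.Set.update_nil]
    simp [tailSum]
  | case2 xs ih =>
    intro t seen
    rw [splitNN_nn]
    have hstep : (('\n' :: '\n' :: xs).foldl stepB (t, seen, 0)) =
        xs.foldl stepB (t, PySem.Set.empty, 0) := by
      simp [stepB]
    rw [hstep, ih t PySem.Set.empty, S_empty (splitNN xs) (splitNN_ne_nil xs)]
    simp only [S]
    rw [show List.filter (fun c => !(c == '\n')) [] = [] from rfl, PySem.Set.update_nil]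
    omega
  | case3 c xs h hnil ih => exact absurd hnil (splitNN_ne_nil xs)
  | case4 c xs h p ps hps ih =>
    intro t seen
    rw [splitNN_cons c xs (fun ys hc hr => h ys hc hr), hps,
      show (match p :: ps with
        | [] => [[c]]
        | q :: qs => (c :: q) :: qs) = (c :: p) :: ps from rfl]
    by_cases hc : c = '\n'
    · subst hc
      have hstep : stepB (t, seen, 0) '\n' = (t, seen, 1) := by simp [stepB]
      rw [List.foldl_cons, hstep]
      cases xs with
      | nil =>
        have hsn : splitNN ([] : List Char) = [[]] := rfl
        rw [hsn] at hps
        injection hps with hp hps'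
        subst hp; subst hps'
        show t = t + S seen [['\n']]
        simp only [S]
        rw [show List.filter (fun c => !(c == '\n')) ['\n'] = [] from rfl,
          PySem.Set.update_nil]
        simp [tailSum]
      | cons d ys =>
        have hd : d ≠ '\n' := fun hd => h ys rfl (by rw [hd])
        have hstep2 : stepB (t, seen, 1) d = stepB (t, seen, 0) d := by
          simp [stepB, hd]
        rw [List.foldl_cons, hstep2, ← List.foldl_cons]
        rw [ih t seen, hps]
        simp only [S]
        rw [show List.filter (fun c => !(c == '\n')) ('\n' :: p) =
          List.filter (fun c => !(c == '\n')) p by simp]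
    · rw [List.foldl_cons]
      have hfilter : List.filter (fun c' => !(c' == '\n')) (c :: p) =
          c :: List.filter (fun c' => !(c' == '\n')) p := by
        simp [beq_eq_false_iff_ne.mpr hc]
      by_cases hmem : PySem.Set.contains seen c = true
      · have hin : c ∈ seen := by simpa using hmem
        have hstep : stepB (t, seen, 0) c = (t, seen, 0) := by
          simp [stepB, hc, hin]
        rw [hstep, ih t seen, hps]
        simp only [S]
        rw [hfilter, PySem.Set.update_cons, PySem.Set.add_of_mem hin]
      · have hnotmem : c ∉ seen := by simpa using hmem
        have hstep : stepB (t, seen, 0) c = (t + 1, PySem.Set.add seen c, 0) := by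
          simp [stepB, hc, hnotmem]
        rw [hstep, ih (t + 1) (PySem.Set.add seen c), hps]
        simp only [S]
        rw [hfilter, PySem.Set.update_cons, PySem.Set.add_of_not_mem hnotmem,
          len_append_singleton]
        omega

theorem part_1_eq_alt (text : String) : part_1 text = part_1_alt text := by
  unfold part_1 part_1_alt
  rw [PySem.List.foldl_add]
  rw [List.map_congr_left (fun g _ => group_eq g)]
  rw [show ("\n\n".toList) = ['\n', '\n'] from rfl, splitOn_nn]
  have hB : ((PySem.Chars.strip text.toList).foldl
      (fun (s : Int × PySem.Set Char × Int) c =>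
        let (total, seen, run) := s
        if c = '\n' then
          if run + 1 == 2 then (total, PySem.Set.empty, 0)
          else (total, seen, run + 1)
        else
          if PySem.Set.contains seen c then (total, seen, 0)
          else (total + 1, PySem.Set.add seen c, 0))
      (0, PySem.Set.empty, 0)).1 =
      ((PySem.Chars.strip text.toList).foldl stepB (0, PySem.Set.empty, 0)).1 := rfl
  rw [hB, scan_eq (PySem.Chars.strip text.toList) 0 PySem.Set.empty,
    S_empty _ (splitNN_ne_nil _)]
  unfold tailSum
  show 0 + (List.map groupCnt (splitNN (PySem.Chars.strip text.toList))).sum =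
    0 + (List.map groupCnt (splitNN (PySem.Chars.strip text.toList))).sum
  rfl

-- ===== VERDICT (by name: the statement is the Claim_ definition above) =====
theorem part_1_spec : Claim_equal_part_1 := by
  intro text _
  unfold Spec_part_1
  exact part_1_eq_alt text
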